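-- pv_equiv track=rewrite | github.com/felipeheckemendes/fundamentals | data-structures-algorithms-ucsandiego/algo-toolbox/M3-3-celebration-party-groups.py | groups_age_ranges
-- ===== SOURCE A (Python) =====
-- def groups_age_ranges(children_ages):
--     index = 0
--     ages = []
--     while index < len(children_ages):
--         group = [children_ages[index], children_ages[index]+2]
--         ages.append(group)
--         index = index+1
--         while index < len(children_ages) and children_ages[index] <= group[1]:
--             index = index + 1
--     return ages
-- ===== SOURCE B (Python) =====
-- def _after_le(xs, bound):
--     """Suffix of xs starting at the first element strictly greater than bound."""
--     for i, x in enumerate(xs):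
--         if x > bound:
--             return xs[i:]
--     return []
--
-- def groups_age_ranges(children_ages):
--     ages = []
--     rest = children_ages
--     while rest:
--         start = rest[0]
--         ages.append([start, start + 2])
--         rest = _after_le(rest[1:], start + 2)
--     return ages
-- ===== Notes on version B (the rewrite author's own statement) =====
-- stated objective: alternative
-- what changed: Replaces A's index cursor with a nested skip-while by a loop over list remainders: each step peels the head off as one group and replaces the remainder by the suffix past the covered prefix, computed by a helper that scans-and-slices; what is maintained changes from an integer cursor to the unprocessed sublist itself.
import Mathlib
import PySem

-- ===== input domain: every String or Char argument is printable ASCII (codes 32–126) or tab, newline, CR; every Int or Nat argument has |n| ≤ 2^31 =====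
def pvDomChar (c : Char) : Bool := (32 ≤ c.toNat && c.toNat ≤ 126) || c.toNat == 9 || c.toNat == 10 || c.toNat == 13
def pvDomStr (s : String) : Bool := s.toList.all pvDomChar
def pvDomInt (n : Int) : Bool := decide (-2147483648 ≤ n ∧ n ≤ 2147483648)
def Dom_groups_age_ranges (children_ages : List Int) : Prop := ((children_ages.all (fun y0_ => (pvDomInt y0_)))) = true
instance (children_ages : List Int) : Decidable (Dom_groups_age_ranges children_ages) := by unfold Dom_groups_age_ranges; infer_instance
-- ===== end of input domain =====

-- B replaces A's index cursor and nested skip-while by a loop over list remainders: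
-- each step peels the head off as a group and replaces the remainder by the suffix
-- past the covered prefix (helper afterLeB); objective: alternative.

-- ===== PORT A =====
-- inner 'while index < len and children_ages[index] <= group[1]: index += 1'
-- (fuel-indexed recursion; fuel = list length suffices since the index strictly increases)
def groupsSkipA (l : List Int) (b : Int) : Nat → Nat → Nat
  | 0, i => i
  | fuel + 1, i =>
    if h : i < l.length then
      if l[i] ≤ b then groupsSkipA l b fuel (i + 1) else i
    else i

-- outer 'while index < len(children_ages): …'
def groupsLoopA (l : List Int) : Nat → Nat → List (List Int) → List (List Int)
  | 0, _, acc => acc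
  | fuel + 1, i, acc =>
    if h : i < l.length then
      groupsLoopA l fuel (groupsSkipA l (l[i] + 2) l.length (i + 1)) (acc ++ [[l[i], l[i] + 2]])
    else acc

def groups_age_ranges (children_ages : List Int) : List (List Int) :=
  groupsLoopA children_ages children_ages.length 0 []

-- ===== PORT B =====
-- helper '_after_le': suffix starting at the first element strictly greater than bound
def afterLeB (bound : Int) : List Int → List Int
  | [] => []
  | x :: xs => if bound < x then x :: xs else afterLeB bound xs

theorem afterLeB_length_le (bound : Int) (xs : List Int) : (afterLeB bound xs).length ≤ xs.length := by
  induction xs with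
  | nil => simp [afterLeB]
  | cons x xs ih =>
    unfold afterLeB
    split
    · simp
    · simp; omega

-- B's 'while rest: …' loop: state is (ages, rest); rest shrinks via afterLeB
def groupsLoopB (ages : List (List Int)) (rest : List Int) : List (List Int) :=
  match rest with
  | [] => ages
  | start :: tail => groupsLoopB (ages ++ [[start, start + 2]]) (afterLeB (start + 2) tail)
termination_by rest.length
decreasing_by
  have := afterLeB_length_le (start + 2) tail
  simp; omega

def groups_age_ranges_alt (children_ages : List Int) : List (List Int) :=
  groupsLoopB [] children_ages

-- ===== PRECONDITION & SPEC =====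
def Spec_groups_age_ranges (children_ages : List Int) (out : List (List Int)) : Prop := out = groups_age_ranges_alt children_ages
instance (children_ages : List Int) (out : List (List Int)) : Decidable (Spec_groups_age_ranges children_ages out) := by unfold Spec_groups_age_ranges; infer_instance

-- ===== CLAIM (what is proved, stated in full; the proofs are below) =====
def Claim_equal_groups_age_ranges : Prop := ∀ (children_ages : List Int), Dom_groups_age_ranges children_ages → Spec_groups_age_ranges children_ages (groups_age_ranges children_ages)

-- ===== LEMMAS AND PROOFS =====

theorem groupsSkipA_ge (l : List Int) (b : Int) (fuel i : Nat) : i ≤ groupsSkipA l b fuel i := by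
  induction fuel generalizing i with
  | zero => simp [groupsSkipA]
  | succ fuel ih =>
    unfold groupsSkipA
    split
    · split
      · have := ih (i + 1); omega
      · omega
    · omega

-- with enough fuel, A's inner while stops exactly where B's helper cuts the suffix
theorem skip_drop (l : List Int) (c : Int) (fuel i : Nat) (hfuel : l.length ≤ fuel + i) :
    l.drop (groupsSkipA l c fuel i) = afterLeB c (l.drop i) := by
  induction fuel generalizing i with
  | zero =>
    rw [groupsSkipA, List.drop_eq_nil_of_le (by omega)]
    simp [afterLeB]
  | succ fuel ih =>
    unfold groupsSkipA
    split
    · rename_i h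
      rw [List.drop_eq_getElem_cons h]
      split
      · rename_i hle
        have hskip : afterLeB c (l[i] :: List.drop (i + 1) l) = afterLeB c (List.drop (i + 1) l) := by
          simp only [afterLeB]; rw [if_neg (by omega)]
        rw [hskip, ih (i + 1) (by omega)]
      · rename_i hgt
        simp only [afterLeB]
        rw [if_pos (by omega), ← List.drop_eq_getElem_cons h]
    · rename_i h
      rw [List.drop_eq_nil_of_le (by omega)]
      simp [afterLeB]

theorem main_lemma (l : List Int) (fuel : Nat) : ∀ (i : Nat) (acc : List (List Int)),
    l.length ≤ fuel + i →
    groupsLoopA l fuel i acc = groupsLoopB acc (l.drop i) := by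
  induction fuel with
  | zero =>
    intro i acc hfuel
    rw [groupsLoopA, List.drop_eq_nil_of_le (by omega), groupsLoopB]
  | succ fuel ih =>
    intro i acc hfuel
    unfold groupsLoopA
    split
    · rename_i h
      rw [ih _ _ (by have := groupsSkipA_ge l (l[i] + 2) l.length (i + 1); omega)]
      rw [skip_drop l (l[i] + 2) l.length (i + 1) (by omega)]
      conv_rhs => rw [List.drop_eq_getElem_cons h, groupsLoopB]
    · rename_i h
      rw [List.drop_eq_nil_of_le (by omega), groupsLoopB]

-- ===== VERDICT (by name: the statement is the Claim_ definition above) =====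
theorem groups_age_ranges_spec : Claim_equal_groups_age_ranges := by
  intro l _
  unfold Spec_groups_age_ranges groups_age_ranges groups_age_ranges_alt
  simpa using main_lemma l l.length 0 [] (by omega)
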